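-- pv_equiv track=rewrite | github.com/LudovichEkzo/infinfinf | main.py | find_column_with_min_sum
-- ===== SOURCE A (Python) =====
-- def sum_of_negative_elements_in_column(matrix, column_index):
--     return sum(row[column_index] for row in matrix if row[column_index] < 0)
--
-- def find_column_with_min_sum(matrix):
--     min_sum = float('inf')
--     min_column_index = -1
--     for column_index in range(len(matrix[0])):
--         column_sum = sum_of_negative_elements_in_column(matrix, column_index)
--         if column_sum < min_sum:
--             min_sum = column_sum
--             min_column_index = column_index
--     return min_column_index, min_sum
-- ===== SOURCE B (Python) =====
-- def find_column_with_min_sum(matrix):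
--     n = len(matrix[0])
--     sums = [0] * n
--     for row in matrix:
--         for j in range(n):
--             x = row[j]
--             if x < 0:
--                 sums[j] += x
--     best_index, best_sum = -1, float('inf')
--     for i, s in enumerate(sums):
--         if s < best_sum:
--             best_index, best_sum = i, s
--     return best_index, best_sum
-- ===== Notes on version B (the rewrite author's own statement) =====
-- stated objective: alternative
-- what changed: Replaces the per-column rescans of the whole matrix with one accumulation pass over the rows into a column-sum table plus a single selection scan over the sums.
-- outside the precondition, e.g. on find_column_with_min_sum([[]]): A returns (-1, inf), B returns (-1, inf); on find_column_with_min_sum([]): A raises IndexError, B raises IndexError; on find_column_with_min_sum([[1, -2], [3]]): A raises IndexError, B raises IndexError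
import Mathlib
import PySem

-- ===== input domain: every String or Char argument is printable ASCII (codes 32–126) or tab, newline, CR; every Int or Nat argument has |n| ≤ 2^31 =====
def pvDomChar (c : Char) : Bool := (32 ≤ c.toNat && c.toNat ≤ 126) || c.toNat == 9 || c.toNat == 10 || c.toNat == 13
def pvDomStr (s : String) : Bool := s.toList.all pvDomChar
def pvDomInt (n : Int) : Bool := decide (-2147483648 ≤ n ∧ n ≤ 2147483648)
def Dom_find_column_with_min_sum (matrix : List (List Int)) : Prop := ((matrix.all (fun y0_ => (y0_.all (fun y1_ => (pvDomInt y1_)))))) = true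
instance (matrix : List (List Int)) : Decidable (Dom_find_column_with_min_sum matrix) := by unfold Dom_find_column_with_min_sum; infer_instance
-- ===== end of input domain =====

-- B replaces A's per-column rescans of the whole matrix with one accumulation pass
-- over the rows into a column-sum table plus a single selection scan (alternative decomposition).

-- ===== PORT A =====
-- row[column_index]: exact when column_index < row.length (guaranteed by Pre_);
-- Python raises IndexError otherwise, which Pre_ excludes.
def sum_of_negative_elements_in_column (matrix : List (List Int)) (ci : Nat) : Int :=
  matrix.foldl (fun acc row => if row.getD ci 0 < 0 then acc + row.getD ci 0 else acc) 0

-- min_sum starts as float('inf'): modelled as `none`; Pre_ guarantees at least one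
-- column so the final min_sum is an Int (`some`).
def find_column_with_min_sum (matrix : List (List Int)) : Int × Int :=
  let st := (List.range (matrix.headD []).length).foldl
    (fun (st : Option Int × Int) ci =>
      let cs := sum_of_negative_elements_in_column matrix ci
      match st.1 with
      | none => (some cs, (ci : Int))
      | some m => if cs < m then (some cs, (ci : Int)) else st)
    (none, -1)
  (st.2, st.1.getD 0)

-- ===== PORT B =====
def find_column_with_min_sum_alt (matrix : List (List Int)) : Int × Int :=
  let n := (matrix.headD []).length
  let sums := matrix.foldl (fun sums row =>
      (List.range n).foldl (fun s j =>
        if row.getD j 0 < 0 then s.set j (s.getD j 0 + row.getD j 0) else s) sums)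
    (List.replicate n 0)
  let r := sums.foldl (fun (st : Nat × Int × Option Int) s =>
      match st.2.2 with
      | none => (st.1 + 1, (st.1 : Int), some s)
      | some b => if s < b then (st.1 + 1, (st.1 : Int), some s) else (st.1 + 1, st.2.1, st.2.2))
    ((0 : Nat), (-1 : Int), (none : Option Int))
  (r.2.1, r.2.2.getD 0)

-- ===== PRECONDITION & SPEC =====
-- Pre_ excludes: matrix = [] (A raises IndexError on matrix[0]); a first row of
-- length 0 (A returns (-1, float('inf')), not a pair of ints); and rows shorter
-- than the first row (A raises IndexError inside the column sum).
def Pre_find_column_with_min_sum (matrix : List (List Int)) : Prop :=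
  matrix ≠ [] ∧ 0 < (matrix.headD []).length ∧
    ∀ row ∈ matrix, (matrix.headD []).length ≤ row.length
instance (matrix : List (List Int)) : Decidable (Pre_find_column_with_min_sum matrix) := by
  unfold Pre_find_column_with_min_sum; infer_instance
def pvWitness_find_column_with_min_sum : List (List Int) := [[1, -2], [3, -4]]

def Spec_find_column_with_min_sum (matrix : List (List Int)) (out : Int × Int) : Prop := out = find_column_with_min_sum_alt matrix
instance (matrix : List (List Int)) (out : Int × Int) : Decidable (Spec_find_column_with_min_sum matrix out) := by unfold Spec_find_column_with_min_sum; infer_instance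

-- ===== CLAIM (what is proved, stated in full; the proofs are below) =====
def Claim_equal_find_column_with_min_sum : Prop := ∀ (matrix : List (List Int)), Dom_find_column_with_min_sum matrix → Pre_find_column_with_min_sum matrix → Spec_find_column_with_min_sum matrix (find_column_with_min_sum matrix)

-- ===== LEMMAS AND PROOFS =====

-- the negative part of a row at column j
def pvNegAt (row : List Int) (j : Nat) : Int :=
  if row.getD j 0 < 0 then row.getD j 0 else 0

theorem pv_sumNeg_shift (l : List (List Int)) (j : Nat) (a : Int) :
    l.foldl (fun acc row => if row.getD j 0 < 0 then acc + row.getD j 0 else acc) a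
      = a + l.foldl (fun acc row => if row.getD j 0 < 0 then acc + row.getD j 0 else acc) 0 := by
  induction l generalizing a with
  | nil => simp
  | cons row rest ih =>
    simp only [List.foldl_cons]
    rw [ih, ih (if row.getD j 0 < 0 then 0 + row.getD j 0 else 0)]
    split <;> ring

theorem pv_sumNeg_cons (row : List Int) (rest : List (List Int)) (j : Nat) :
    sum_of_negative_elements_in_column (row :: rest) j
      = pvNegAt row j + sum_of_negative_elements_in_column rest j := by
  unfold sum_of_negative_elements_in_column pvNegAt
  simp only [List.foldl_cons]
  rw [pv_sumNeg_shift]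
  split <;> ring

theorem pv_inner (row : List Int) (n : Nat) (s : List Int) (h : n ≤ s.length) :
    (((List.range n).foldl (fun s j =>
        if row.getD j 0 < 0 then s.set j (s.getD j 0 + row.getD j 0) else s) s).length = s.length) ∧
    (∀ j, ((List.range n).foldl (fun s j =>
        if row.getD j 0 < 0 then s.set j (s.getD j 0 + row.getD j 0) else s) s).getD j 0
        = if j < n then s.getD j 0 + pvNegAt row j else s.getD j 0) := by
  induction n with
  | zero => simp
  | succ m ih =>
    have hm : m ≤ s.length := Nat.le_of_succ_le h
    obtain ⟨ihlen, ihget⟩ := ih hm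
    rw [List.range_succ]
    simp only [List.foldl_append, List.foldl_cons, List.foldl_nil]
    set t := (List.range m).foldl (fun s j =>
        if row.getD j 0 < 0 then s.set j (s.getD j 0 + row.getD j 0) else s) s with ht
    have hmt : m < t.length := by omega
    constructor
    · split <;> simp [ihlen]
    · intro j
      have htm : t.getD m 0 = s.getD m 0 := by rw [ihget]; simp
      by_cases hj : j = m
      · subst hj
        simp only [List.getD] at htm
        split
        · rename_i hneg
          simp only [List.getD, List.getElem?_set_self hmt, Option.getD_some]
          rw [htm]
          simp only [List.getD] at hneg ⊢
          simp [pvNegAt, List.getD, hneg]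
        · rename_i hneg
          rw [ihget]
          simp only [List.getD] at hneg ⊢
          simp [pvNegAt, List.getD, hneg]
      · have : (if row.getD m 0 < 0 then t.set m (t.getD m 0 + row.getD m 0) else t).getD j 0
            = t.getD j 0 := by
          split
          · simp [List.getD, List.getElem?_set_ne (by omega : m ≠ j)]
          · rfl
        rw [this, ihget]
        by_cases hjm : j < m
        · simp [hjm, Nat.lt_succ_of_lt hjm]
        · have h1 : ¬ j < m := hjm
          have h2 : ¬ j < m + 1 := by omega
          simp [h1, h2]

theorem pv_rows (n : Nat) (matrix : List (List Int)) :
    ∀ s : List Int, s.length = n →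
    ((matrix.foldl (fun sums row =>
        (List.range n).foldl (fun s j =>
          if row.getD j 0 < 0 then s.set j (s.getD j 0 + row.getD j 0) else s) sums) s).length = n) ∧
    (∀ j < n, (matrix.foldl (fun sums row =>
        (List.range n).foldl (fun s j =>
          if row.getD j 0 < 0 then s.set j (s.getD j 0 + row.getD j 0) else s) sums) s).getD j 0
        = s.getD j 0 + sum_of_negative_elements_in_column matrix j) := by
  induction matrix with
  | nil =>
    intro s hs
    refine ⟨hs, ?_⟩
    intro j _
    simp [sum_of_negative_elements_in_column]
  | cons row rest ih =>
    intro s hs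
    simp only [List.foldl_cons]
    obtain ⟨hlen, hget⟩ := pv_inner row n s (by omega)
    obtain ⟨ihlen, ihget⟩ :=
      ih ((List.range n).foldl (fun s j =>
        if row.getD j 0 < 0 then s.set j (s.getD j 0 + row.getD j 0) else s) s) (by omega)
    refine ⟨ihlen, ?_⟩
    intro j hj
    rw [ihget j hj, hget j, pv_sumNeg_cons, if_pos hj]
    ring

-- generic selection correspondence: B's counter-based scan over the mapped values
-- equals A's scan over the indices themselves
theorem pv_sel (f : Nat → Int) :
    ∀ (n k : Nat) (bi : Int) (m : Option Int),
    (((List.range' k n).map f).foldl (fun (st : Nat × Int × Option Int) s =>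
        match st.2.2 with
        | none => (st.1 + 1, (st.1 : Int), some s)
        | some b => if s < b then (st.1 + 1, (st.1 : Int), some s) else (st.1 + 1, st.2.1, st.2.2))
      (k, bi, m))
    = (k + n,
       ((List.range' k n).foldl (fun (st : Option Int × Int) ci =>
          match st.1 with
          | none => (some (f ci), (ci : Int))
          | some mv => if f ci < mv then (some (f ci), (ci : Int)) else st) (m, bi)).2,
       ((List.range' k n).foldl (fun (st : Option Int × Int) ci =>
          match st.1 with
          | none => (some (f ci), (ci : Int))
          | some mv => if f ci < mv then (some (f ci), (ci : Int)) else st) (m, bi)).1) := by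
  intro n
  induction n with
  | zero => intro k bi m; simp
  | succ p ih =>
    intro k bi m
    rw [List.range'_succ]
    simp only [List.map_cons, List.foldl_cons]
    have hk : k + 1 + p = k + (p + 1) := by omega
    cases m with
    | none =>
      rw [ih (k + 1) (k : Int) (some (f k)), hk]
    | some b =>
      by_cases hlt : f k < b
      · simp only [hlt, if_pos]
        rw [ih (k + 1) (k : Int) (some (f k)), hk]
      · simp only [hlt, if_neg, not_false_iff]
        rw [ih (k + 1) bi (some b), hk]

theorem pv_main (matrix : List (List Int)) :
    find_column_with_min_sum matrix = find_column_with_min_sum_alt matrix := by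
  unfold find_column_with_min_sum find_column_with_min_sum_alt
  dsimp only
  obtain ⟨hlen, hget⟩ := pv_rows (matrix.headD []).length matrix
    (List.replicate (matrix.headD []).length 0) (by simp)
  have hmap : matrix.foldl (fun sums row =>
      (List.range (matrix.headD []).length).foldl (fun s j =>
        if row.getD j 0 < 0 then s.set j (s.getD j 0 + row.getD j 0) else s) sums)
      (List.replicate (matrix.headD []).length 0)
      = (List.range (matrix.headD []).length).map
          (fun j => sum_of_negative_elements_in_column matrix j) := by
    apply List.ext_getElem
    · rw [List.length_map, List.length_range]; exact hlen
    · intro i h1 h2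
      have hi : i < (matrix.headD []).length := by simpa using h2
      have h3 := hget i hi
      rw [List.getD_eq_getElem _ 0 (by omega)] at h3
      simp only [List.getElem_map, List.getElem_range]
      rw [h3]
      simp
  rw [hmap, List.range_eq_range',
    pv_sel (fun j => sum_of_negative_elements_in_column matrix j)
      (matrix.headD []).length 0 (-1) none]

-- ===== VERDICT (by name: the statement is the Claim_ definition above) =====
theorem find_column_with_min_sum_spec : Claim_equal_find_column_with_min_sum := by
  intro matrix _ _
  unfold Spec_find_column_with_min_sum
  exact pv_main matrix
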